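-- pv_equiv track=rewrite | github.com/sudheerchunduri/ramble | lib/ramble/ramble/workspace/workspace.py | specs_equiv
-- ===== SOURCE A (Python) =====
-- def specs_equiv(spec1, spec2):
--     all_keys = set(spec1.keys())
--     all_keys.update(set(spec2.keys()))
--
--     if len(all_keys) != len(spec1.keys()):
--         return False
--
--     if 'application_name' in all_keys:
--         all_keys.remove('application_name')
--
--     if 'spec_type' in all_keys:
--         all_keys.remove('spec_type')
--
--     for key in all_keys:
--         if key not in spec1:
--             return False
--         if key not in spec2:
--             return False
--         if spec1[key] != spec2[key]:
--             return False
--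
--     return True
-- ===== SOURCE B (Python) =====
-- def specs_equiv(spec1, spec2):
--     if any(k not in spec1 for k in spec2):
--         return False
--     ignore = ('application_name', 'spec_type')
--     items1 = sorted(((k, v) for k, v in spec1.items() if k not in ignore), key=lambda kv: kv[0])
--     items2 = sorted(((k, v) for k, v in spec2.items() if k not in ignore), key=lambda kv: kv[0])
--     return items1 == items2
-- ===== Notes on version B (the rewrite author's own statement) =====
-- stated objective: alternative
-- what changed: Replaces A's union-set/length guard and per-key membership loop by sort-based canonicalisation: after a containment guard over spec2's keys, each dict's non-ignored items are sorted by key and the two sorted item lists are compared for equality.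
import Mathlib
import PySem

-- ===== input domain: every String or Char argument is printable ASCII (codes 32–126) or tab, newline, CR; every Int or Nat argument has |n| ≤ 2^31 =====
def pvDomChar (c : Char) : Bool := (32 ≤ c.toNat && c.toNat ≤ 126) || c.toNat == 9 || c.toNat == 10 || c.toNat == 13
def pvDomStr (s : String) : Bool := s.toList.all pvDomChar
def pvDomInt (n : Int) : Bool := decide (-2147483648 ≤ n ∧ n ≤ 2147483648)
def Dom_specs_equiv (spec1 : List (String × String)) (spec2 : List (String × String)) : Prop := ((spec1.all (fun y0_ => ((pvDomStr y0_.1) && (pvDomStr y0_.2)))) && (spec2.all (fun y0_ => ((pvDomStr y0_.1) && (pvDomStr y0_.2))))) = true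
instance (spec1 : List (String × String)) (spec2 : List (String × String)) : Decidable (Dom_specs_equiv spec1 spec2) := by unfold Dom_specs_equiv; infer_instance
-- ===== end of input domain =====

-- B replaces A's union-set/length guard and per-key loop by sort-based canonicalisation:
-- after a containment guard over spec2's keys, the non-ignored items of each dict are
-- sorted by key and the sorted lists compared (objective: alternative algorithm).

-- ===== PORT A =====
def specs_equiv (spec1 : List (String × String)) (spec2 : List (String × String)) : Bool :=
  let d1 := PySem.Dict.ofList spec1
  let d2 := PySem.Dict.ofList spec2
  let allKeys := PySem.Set.update (PySem.Set.ofList d1.keys) (PySem.Set.ofList d2.keys)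
  if PySem.Set.len allKeys ≠ (d1.keys.length : Int) then false
  else
    let ak1 := if PySem.Set.contains allKeys "application_name" then PySem.Set.discard allKeys "application_name" else allKeys
    let ak2 := if PySem.Set.contains ak1 "spec_type" then PySem.Set.discard ak1 "spec_type" else ak1
    -- the for-loop over the set: early-return-False / True at the end = List.all (order-independent result)
    ak2.all (fun key =>
      if !(d1.contains key) then false
      else if !(d2.contains key) then false
      else if d1.get? key != d2.get? key then false
      else true)

-- ===== PORT B =====
def specs_equiv_alt (spec1 : List (String × String)) (spec2 : List (String × String)) : Bool :=
  let d1 := PySem.Dict.ofList spec1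
  let d2 := PySem.Dict.ofList spec2
  -- any(k not in spec1 for k in spec2)
  if d2.keys.any (fun k => !(d1.contains k)) then false
  else
    -- sorted((k, v) for k, v in d.items() if k not in ignore, key=lambda kv: kv[0])
    let items1 := PySem.List.sorted
      (d1.items.filter (fun kv => !(kv.1 == "application_name" || kv.1 == "spec_type")))
      (fun kv => kv.1) false
    let items2 := PySem.List.sorted
      (d2.items.filter (fun kv => !(kv.1 == "application_name" || kv.1 == "spec_type")))
      (fun kv => kv.1) false
    items1 == items2

-- ===== PRECONDITION & SPEC =====
def Spec_specs_equiv (spec1 : List (String × String)) (spec2 : List (String × String)) (out : Bool) : Prop := out = specs_equiv_alt spec1 spec2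
instance (spec1 : List (String × String)) (spec2 : List (String × String)) (out : Bool) : Decidable (Spec_specs_equiv spec1 spec2 out) := by unfold Spec_specs_equiv; infer_instance

-- ===== CLAIM (what is proved, stated in full; the proofs are below) =====
def Claim_equal_specs_equiv : Prop := ∀ (spec1 : List (String × String)) (spec2 : List (String × String)), Dom_specs_equiv spec1 spec2 → Spec_specs_equiv spec1 spec2 (specs_equiv spec1 spec2)

-- ===== LEMMAS AND PROOFS =====

-- s.update(xs) is s itself when every element of xs is already in s
theorem set_update_of_subset {α : Type} [BEq α] [LawfulBEq α] (xs : List α) (s : PySem.Set α)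
    (h : ∀ x ∈ xs, x ∈ s) : PySem.Set.update s xs = s := by
  induction xs generalizing s with
  | nil => rfl
  | cons x xs ih =>
    rw [PySem.Set.update_cons, PySem.Set.add_of_mem (h x (by simp))]
    exact ih s (fun y hy => h y (by simp [hy]))

-- the length of s.update(xs) equals |s| iff xs ⊆ s
theorem set_len_update_eq_iff {α : Type} [BEq α] [LawfulBEq α] (s : PySem.Set α) (xs : List α) :
    (PySem.Set.update s xs).length = s.length ↔ ∀ x ∈ xs, x ∈ s := by
  rw [PySem.Set.update_eq_append_filter]
  simp only [List.length_append, Nat.add_eq_left, List.length_eq_zero_iff,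
    List.filter_eq_nil_iff]
  constructor
  · intro h x hx
    have := h x ((PySem.Set.mem_ofList xs x).2 hx)
    simpa [PySem.Set.contains_iff] using this
  · intro h y hy
    simp [h y ((PySem.Set.mem_ofList xs y).1 hy)]

-- `if x in s: s.remove(x)` = discard, and discard of a non-member is the identity
theorem discard_if_contains {α : Type} [BEq α] [LawfulBEq α] (s : PySem.Set α) (x : α) :
    (if PySem.Set.contains s x then PySem.Set.discard s x else s) = PySem.Set.discard s x := by
  split_ifs with h
  · rfl
  · have hx : x ∉ s := fun hm => h ((PySem.Set.contains_iff s x).2 hm)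
    unfold PySem.Set.discard
    exact (List.filter_eq_self.2 (fun y hy => by
      have : y ≠ x := fun e => hx (e ▸ hy)
      simp [this])).symm

-- the loop body's if-chain as a proposition
theorem loop_body_iff (d1 d2 : PySem.Dict String String) (x : String) :
    ((if (!d1.contains x) = true then false
      else if (!d2.contains x) = true then false
      else if (d1.get? x != d2.get? x) = true then false else true) = true)
      ↔ (x ∈ d1.keys ∧ x ∈ d2.keys ∧ d1.get? x = d2.get? x) := by
  rw [← PySem.Dict.contains_iff_mem_keys d1 x, ← PySem.Dict.contains_iff_mem_keys d2 x]
  cases hc1 : d1.contains x <;> cases hc2 : d2.contains x <;>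
    simp [bne_iff_ne]

-- equality of the two key-sorted lists is exactly a permutation, when keys are distinct
theorem sorted_fst_eq_iff_perm {ν : Type} (l1 l2 : List (String × ν))
    (h1 : (l1.map Prod.fst).Nodup) :
    (PySem.List.sorted l1 (fun kv => kv.1) false = PySem.List.sorted l2 (fun kv => kv.1) false)
      ↔ l1.Perm l2 := by
  constructor
  · intro h
    have p1 := PySem.List.sorted_perm l1 (fun kv => kv.1) false
    have p2 := PySem.List.sorted_perm l2 (fun kv => kv.1) false
    exact (p1.symm.trans (h ▸ p2))
  · intro hperm
    have p1 := PySem.List.sorted_perm l1 (fun kv => kv.1) false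
    have hle : (PySem.List.sorted l1 (fun kv => kv.1) false).Pairwise (fun a b => a.1 ≤ b.1) :=
      PySem.List.sorted_pairwise l1 (fun kv => kv.1)
    have hnd : ((PySem.List.sorted l1 (fun kv => kv.1) false).map Prod.fst).Nodup :=
      ((p1.map Prod.fst).nodup_iff).2 h1
    have hne : (PySem.List.sorted l1 (fun kv => kv.1) false).Pairwise (fun a b => a.1 ≠ b.1) := by
      rw [List.nodup_iff_pairwise_ne, List.pairwise_map] at hnd
      exact hnd
    have hlt : (PySem.List.sorted l1 (fun kv => kv.1) false).Pairwise (fun a b => a.1 < b.1) :=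
      (hle.and hne).imp (fun h => lt_of_le_of_ne h.1 h.2)
    exact (PySem.List.sorted_eq_of_perm_of_pairwise_lt l2 _ (fun kv => kv.1) (p1.trans hperm) hlt).symm

-- (k, v) is a non-ignored item of d  ↔  the lookup says so and k is not ignored
theorem mem_filter_items_iff (d : PySem.Dict String String) (hnd : d.keys.Nodup)
    (k : String) (v : String) :
    ((k, v) ∈ d.items.filter (fun kv => !(kv.1 == "application_name" || kv.1 == "spec_type")))
      ↔ (d.get? k = some v ∧ k ≠ "application_name" ∧ k ≠ "spec_type") := by
  rw [List.mem_filter, ← PySem.Dict.get?_eq_some_iff_mem_items d k v hnd]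
  simp

-- ===== VERDICT (by name: the statement is the Claim_ definition above) =====
theorem specs_equiv_spec : Claim_equal_specs_equiv := by
  intro spec1 spec2 _
  unfold Spec_specs_equiv specs_equiv specs_equiv_alt
  simp only []
  set d1 := PySem.Dict.ofList spec1 with hd1
  set d2 := PySem.Dict.ofList spec2 with hd2
  have hn1 : d1.keys.Nodup := PySem.Dict.nodup_keys_ofList spec1
  have hn2 : d2.keys.Nodup := PySem.Dict.nodup_keys_ofList spec2
  rw [PySem.Set.ofList_eq_self_of_nodup d1.keys hn1, PySem.Set.ofList_eq_self_of_nodup d2.keys hn2]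
  by_cases hsub : ∀ k ∈ d2.keys, k ∈ d1.keys
  · -- subset holds: A's length guard passes, B's any-guard is false
    have hup : PySem.Set.update d1.keys d2.keys = d1.keys := set_update_of_subset d2.keys d1.keys hsub
    have hA : ¬ (PySem.Set.len (PySem.Set.update d1.keys d2.keys) ≠ (d1.keys.length : Int)) := by
      simp [PySem.Set.len, hup]
    have hB : ¬ (d2.keys.any (fun k => !(d1.contains k)) = true) := by
      simp only [List.any_eq_true]
      rintro ⟨k, hk, hc⟩
      simp [(PySem.Dict.contains_iff_mem_keys d1 k).2 (hsub k hk)] at hc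
    rw [if_neg hA, if_neg hB, hup, discard_if_contains, discard_if_contains]
    have hnf1 : ((d1.items.filter (fun kv => !(kv.1 == "application_name" || kv.1 == "spec_type"))).map Prod.fst).Nodup :=
      hn1.sublist (List.filter_sublist.map Prod.fst)
    rw [Bool.eq_iff_iff, beq_iff_eq,
      sorted_fst_eq_iff_perm _ _ hnf1]
    have hnf2 : (d2.items.filter (fun kv => !(kv.1 == "application_name" || kv.1 == "spec_type"))).Nodup := by
      have : ((d2.items.filter (fun kv => !(kv.1 == "application_name" || kv.1 == "spec_type"))).map Prod.fst).Nodup :=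
        hn2.sublist (List.filter_sublist.map Prod.fst)
      exact this.of_map
    have hnf1' : (d1.items.filter (fun kv => !(kv.1 == "application_name" || kv.1 == "spec_type"))).Nodup :=
      hnf1.of_map
    rw [List.perm_ext_iff_of_nodup hnf1' hnf2]
    simp only [List.all_eq_true, PySem.Set.mem_discard, loop_body_iff]
    constructor
    · -- A's loop passes → same non-ignored item sets
      intro hall p
      rcases p with ⟨k, v⟩
      rw [mem_filter_items_iff d1 hn1, mem_filter_items_iff d2 hn2]
      constructor
      · rintro ⟨hv, h1, h2⟩
        have hk1 : k ∈ d1.keys := by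
          have hm := (PySem.Dict.get?_eq_some_iff_mem_items d1 k v hn1).1 hv
          simp only [PySem.Dict.keys]
          exact List.mem_map.2 ⟨(k, v), hm, rfl⟩
        obtain ⟨_, _, heq⟩ := hall k ⟨⟨hk1, h1⟩, h2⟩
        exact ⟨heq ▸ hv, h1, h2⟩
      · rintro ⟨hv, h1, h2⟩
        have hk2 : k ∈ d2.keys := by
          have hm := (PySem.Dict.get?_eq_some_iff_mem_items d2 k v hn2).1 hv
          simp only [PySem.Dict.keys]
          exact List.mem_map.2 ⟨(k, v), hm, rfl⟩
        obtain ⟨_, _, heq⟩ := hall k ⟨⟨hsub k hk2, h1⟩, h2⟩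
        exact ⟨heq ▸ hv, h1, h2⟩
    · -- same non-ignored item sets → A's loop passes
      intro hiff k hk
      obtain ⟨⟨hk1, h1⟩, h2⟩ := hk
      obtain ⟨v, hv⟩ : ∃ v, d1.get? k = some v := by
        obtain ⟨p, hp, hpk⟩ := List.mem_map.1 (by simpa only [PySem.Dict.keys] using hk1)
        refine ⟨p.2, ?_⟩
        rw [← hpk]
        exact (PySem.Dict.get?_eq_some_iff_mem_items d1 p.1 p.2 hn1).2 (by simpa using hp)
      have := (hiff (k, v)).1 ((mem_filter_items_iff d1 hn1 k v).2 ⟨hv, h1, h2⟩)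
      rw [mem_filter_items_iff d2 hn2] at this
      obtain ⟨hv2, _, _⟩ := this
      have hk2 : k ∈ d2.keys := by
        have hm := (PySem.Dict.get?_eq_some_iff_mem_items d2 k v hn2).1 hv2
        simp only [PySem.Dict.keys]
        exact List.mem_map.2 ⟨(k, v), hm, rfl⟩
      exact ⟨hk1, hk2, hv.trans hv2.symm⟩
  · -- subset fails: both return false
    have hA : PySem.Set.len (PySem.Set.update d1.keys d2.keys) ≠ (d1.keys.length : Int) := by
      intro h
      simp only [PySem.Set.len, Nat.cast_inj] at h
      exact hsub ((set_len_update_eq_iff d1.keys d2.keys).1 h)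
    have hB : d2.keys.any (fun k => !(d1.contains k)) = true := by
      simp only [not_forall] at hsub
      obtain ⟨k, hk, hnk⟩ := hsub
      refine List.any_eq_true.2 ⟨k, hk, ?_⟩
      simp only [Bool.not_eq_true']
      rw [← Bool.not_eq_true]
      intro h
      exact hnk ((PySem.Dict.contains_iff_mem_keys d1 k).1 h)
    rw [if_pos hA, if_pos hB]
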